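-- pv_equiv track=rewrite | github.com/Felerius/aoc2017 | day09.py | remove_cancelled
-- ===== SOURCE A (Python) =====
-- def remove_cancelled(chars):
--     """Remove exclamation marks and the char followed by them.
--
--     >>> ''.join(remove_cancelled('{{<!>},{<!>},{<!>},{<a>}}'))
--     '{{<},{<},{<},{<a>}}'
--     """
--     char_iter = iter(chars)
--     while True:
--         try:
--             c = next(char_iter)
--             if c == '!':
--                 next(char_iter)
--             else:
--                 yield c
--         except StopIteration:
--             break
-- ===== SOURCE B (Python) =====
-- def remove_cancelled(chars):
--     """Remove exclamation marks and the char followed by them."""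
--     pieces = chars.split('!')
--     yield from pieces[0]
--     i = 1
--     while i < len(pieces):
--         if pieces[i] == '' and i + 1 < len(pieces):
--             # the '!' before this empty piece escaped the next '!';
--             # the following piece is therefore literal text
--             yield from pieces[i + 1]
--             i += 2
--         else:
--             # the '!' before this piece swallows its first char
--             yield from pieces[i][1:]
--             i += 1
-- ===== Notes on version B (the rewrite author's own statement) =====
-- stated objective: alternative
-- what changed: B replaces A's char-by-char iterator driving (manual next() calls, with an exclamation mark swallowing the following char) by a single str.split on the exclamation mark followed by a stitching pass over the pieces that drops each piece's escaped first character (an empty piece means the escaped char was itself an exclamation mark, so the following piece is emitted verbatim).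
import Mathlib
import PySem

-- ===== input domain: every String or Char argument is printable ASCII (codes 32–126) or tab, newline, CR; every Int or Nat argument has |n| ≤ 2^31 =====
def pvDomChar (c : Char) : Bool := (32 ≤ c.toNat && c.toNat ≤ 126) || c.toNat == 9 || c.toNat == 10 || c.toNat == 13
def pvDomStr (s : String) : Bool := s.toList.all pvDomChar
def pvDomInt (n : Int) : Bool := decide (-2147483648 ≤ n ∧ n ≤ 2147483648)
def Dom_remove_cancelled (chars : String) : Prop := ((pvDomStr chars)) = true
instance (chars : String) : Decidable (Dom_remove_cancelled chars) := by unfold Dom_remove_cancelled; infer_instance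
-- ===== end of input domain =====

-- B replaces A's char-by-char iterator driving with a split-on-'!' pass that stitches the
-- pieces back (dropping each piece's first, escaped, char); objective: alternative decomposition.

-- ===== PORT A =====
-- A: generator pulling chars one by one; on '!' it pulls (and discards) the next char,
-- otherwise it yields the char; StopIteration (list exhausted) ends the loop.
def removeCancelledGoA : List Char → List String
  | [] => []
  | c :: rest =>
    if c = '!' then
      match rest with
      | [] => []                       -- inner next() raises StopIteration → break
      | _ :: rest' => removeCancelledGoA rest'
    else String.ofList [c] :: removeCancelledGoA rest

def remove_cancelled (chars : String) : List String :=
  removeCancelledGoA chars.toList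

-- ===== PORT B =====
-- yield from a string: each character as a one-char string
def pvYieldFrom (s : String) : List String := s.toList.map (fun c => String.ofList [c])

-- the stitching while-loop over pieces[1:]
def pvStitch : List String → List String
  | [] => []
  | [p] => pvYieldFrom (PySem.Str.slice p (some 1) none)
  | p :: q :: rest =>
    if p = "" then pvYieldFrom q ++ pvStitch rest
    else pvYieldFrom (PySem.Str.slice p (some 1) none) ++ pvStitch (q :: rest)

def remove_cancelled_alt (chars : String) : List String :=
  match PySem.Str.split? chars "!" with
  | some (p :: ps) => pvYieldFrom p ++ pvStitch ps
  | _ => []                            -- unreachable: split with a non-empty separator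

-- ===== PRECONDITION & SPEC =====
def Spec_remove_cancelled (chars : String) (out : List String) : Prop := out = remove_cancelled_alt chars
instance (chars : String) (out : List String) : Decidable (Spec_remove_cancelled chars out) := by unfold Spec_remove_cancelled; infer_instance

-- ===== CLAIM (what is proved, stated in full; the proofs are below) =====
def Claim_equal_remove_cancelled : Prop := ∀ (chars : String), Dom_remove_cancelled chars → Spec_remove_cancelled chars (remove_cancelled chars)

-- ===== LEMMAS AND PROOFS =====

-- fuel-free model of PySem.Chars.splitOn on the single-char separator '!'
def spC : List Char → List Char → List (List Char)
  | [], cur => [cur.reverse]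
  | c :: rest, cur => if c = '!' then cur.reverse :: spC rest [] else spC rest (c :: cur)

-- pvYieldFrom / pvStitch, moved to List Char pieces
def chars1C (l : List Char) : List String := l.map (fun c => String.ofList [c])

def stitchC : List (List Char) → List String
  | [] => []
  | [p] => chars1C p.tail
  | p :: q :: rest =>
    if p = [] then chars1C q ++ stitchC rest
    else chars1C p.tail ++ stitchC (q :: rest)

def headSt : List (List Char) → List String
  | [] => []
  | p :: ps => chars1C p ++ stitchC ps

theorem spC_ne_nil (cs cur : List Char) : spC cs cur ≠ [] := by
  induction cs generalizing cur with
  | nil => simp [spC]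
  | cons c rest ih =>
    simp only [spC]
    split_ifs <;> simp [ih]

theorem splitOn_go_eq (cs : List Char) : ∀ (fuel : Nat) (cur : List Char)
    (acc : List (List Char)), cs.length ≤ fuel →
    PySem.Chars.splitOn.go ['!'] fuel cs cur acc = acc.reverse ++ spC cs cur := by
  induction cs with
  | nil =>
    intro fuel cur acc _
    cases fuel <;> simp [PySem.Chars.splitOn.go, spC]
  | cons c rest ih =>
    intro fuel cur acc hle
    cases fuel with
    | zero => simp at hle
    | succ f =>
      simp only [List.length_cons] at hle
      by_cases hc : c = '!'
      · subst hc
        have hpre : List.isPrefixOf ['!'] ('!' :: rest) = true := by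
          simp [List.isPrefixOf]
        simp only [PySem.Chars.splitOn.go, hpre, if_true]
        rw [show List.drop (['!'] : List Char).length ('!' :: rest) = rest by simp]
        rw [ih f [] (cur.reverse :: acc) (by omega)]
        simp [spC]
      · have hpre : List.isPrefixOf ['!'] (c :: rest) = false := by
          simp [List.isPrefixOf]
          intro h; exact absurd h.symm hc
        simp only [PySem.Chars.splitOn.go, hpre, Bool.false_eq_true, if_false]
        rw [ih f (c :: cur) acc (by omega)]
        simp [spC, hc]

theorem splitOn_eq (cs : List Char) : PySem.Chars.splitOn cs ['!'] = spC cs [] := by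
  have h := splitOn_go_eq cs (cs.length + 1) [] [] (by omega)
  simpa [PySem.Chars.splitOn] using h

theorem pvYieldFrom_tail (p : String) :
    pvYieldFrom (PySem.Str.slice p (some 1) none) = chars1C p.toList.tail := by
  unfold pvYieldFrom chars1C
  rw [PySem.Str.toList_slice]
  simp [PySem.List.slice_from_one]

theorem pvStitch_eq : ∀ (ps : List String), pvStitch ps = stitchC (ps.map String.toList)
  | [] => by simp [pvStitch, stitchC]
  | [p] => by simp [pvStitch, stitchC, pvYieldFrom_tail]
  | p :: q :: rest => by
    by_cases hp : p = ""
    · subst hp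
      simp [pvStitch, stitchC, pvStitch_eq rest, pvYieldFrom, chars1C]
    · have hp' : p.toList ≠ [] := by simpa using hp
      simp [pvStitch, stitchC, hp, hp', pvStitch_eq (q :: rest), pvYieldFrom_tail]

-- the single big invariant: how headSt / stitchC act on the split of cs, for any
-- accumulated current piece cur
theorem spC_bang (rest cur : List Char) :
    spC ('!' :: rest) cur = cur.reverse :: spC rest [] := by simp [spC]

theorem spC_other {c : Char} (h : c ≠ '!') (rest cur : List Char) :
    spC (c :: rest) cur = spC rest (c :: cur) := by simp [spC, h]

theorem goA_bang (rest : List Char) :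
    removeCancelledGoA ('!' :: rest) =
      match rest with | [] => [] | _ :: r => removeCancelledGoA r := by
  rw [removeCancelledGoA.eq_def]; simp

theorem goA_other {c : Char} (h : c ≠ '!') (rest : List Char) :
    removeCancelledGoA (c :: rest) = String.ofList [c] :: removeCancelledGoA rest := by
  rw [removeCancelledGoA.eq_def]; simp [h]

-- the single big invariant: how headSt / stitchC act on the split of cs, for any
-- accumulated current piece cur
theorem main_inv (cs : List Char) :
    (∀ cur, headSt (spC cs cur) = chars1C cur.reverse ++ removeCancelledGoA cs) ∧
    (∀ cur, cur ≠ [] →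
      stitchC (spC cs cur) = chars1C cur.reverse.tail ++ removeCancelledGoA cs) ∧
    (stitchC (spC cs []) =
      match cs with | [] => [] | _ :: r => removeCancelledGoA r) := by
  induction cs with
  | nil =>
    refine ⟨?_, ?_, ?_⟩
    · intro cur; simp [spC, headSt, stitchC, removeCancelledGoA, chars1C]
    · intro cur _; simp [spC, stitchC, removeCancelledGoA, chars1C]
    · simp [spC, stitchC, chars1C]
  | cons c rest ih =>
    obtain ⟨ih1, ih2, ih3⟩ := ih
    by_cases hc : c = '!'
    · subst hc
      obtain ⟨q, ps, hqs⟩ : ∃ q ps, spC rest [] = q :: ps := by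
        cases h : spC rest [] with
        | nil => exact absurd h (spC_ne_nil rest [])
        | cons q ps => exact ⟨q, ps, rfl⟩
      refine ⟨?_, ?_, ?_⟩
      · intro cur
        rw [spC_bang, goA_bang]
        simp only [headSt]
        rw [ih3]
      · intro cur hcur
        have hrev : cur.reverse ≠ [] := by simpa using hcur
        rw [spC_bang, hqs]
        simp only [stitchC, if_neg hrev]
        rw [← hqs, ih3, goA_bang]
      · rw [spC_bang, List.reverse_nil, hqs]
        have h1 := ih1 []
        rw [hqs] at h1
        simp only [headSt, List.reverse_nil, chars1C, List.map_nil,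
          List.nil_append] at h1
        simpa [stitchC] using h1
    · refine ⟨?_, ?_, ?_⟩
      · intro cur
        rw [spC_other hc, ih1 (c :: cur), goA_other hc]
        simp [chars1C]
      · intro cur hcur
        have hrev : cur.reverse ≠ [] := by simpa using hcur
        rw [spC_other hc, ih2 (c :: cur) (by simp), goA_other hc]
        simp only [List.reverse_cons]
        rw [List.tail_append_of_ne_nil hrev]
        simp [chars1C]
      · rw [spC_other hc, ih2 [c] (by simp)]
        simp [chars1C]

-- ===== VERDICT (by name: the statement is the Claim_ definition above) =====
theorem remove_cancelled_spec : Claim_equal_remove_cancelled := by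
  intro chars _
  unfold Spec_remove_cancelled remove_cancelled remove_cancelled_alt
  have hmap := PySem.Str.split?_map chars "!"
  have hsplit : PySem.Chars.split? chars.toList ['!'] = some (spC chars.toList []) := by
    simp [PySem.Chars.split?, splitOn_eq]
  rw [show ("!".toList : List Char) = ['!'] from rfl, hsplit] at hmap
  cases hps : PySem.Str.split? chars "!" with
  | none => rw [hps] at hmap; simp at hmap
  | some ps =>
    rw [hps] at hmap
    simp only [Option.map_some, Option.some.injEq] at hmap
    cases ps with
    | nil =>
      exfalso
      exact spC_ne_nil chars.toList [] (by simpa using hmap.symm)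
    | cons p pt =>
      show removeCancelledGoA chars.toList = pvYieldFrom p ++ pvStitch pt
      have h1 := (main_inv chars.toList).1 []
      rw [← hmap] at h1
      simp only [List.map_cons, headSt, List.reverse_nil, chars1C, List.map_nil,
        List.nil_append] at h1
      rw [pvStitch_eq]
      simp only [pvYieldFrom]
      exact h1.symm
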